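-- pv_equiv track=rewrite | github.com/marceloteck/megasenav3.0 | MEGA-SENA/Mega_cod_1.3.6.py | calcular_ajustes_reversos
-- ===== SOURCE A (Python) =====
-- def calcular_ajustes_reversos(previsao, resultado_esperado):
--     ajustes = []
--     for p, r in zip(previsao, resultado_esperado):
--         ajuste_total = 0
--         while p != r:
--             if p < r:
--                 if r - p >= 9:
--                     p += 9
--                     ajuste_total += 9
--                 elif r - p >= 6:
--                     p += 6
--                     ajuste_total += 6
--                 elif r - p >= 3:
--                     p += 3
--                     ajuste_total += 3
--                 else:
--                     p += 1
--                     ajuste_total += 1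
--             else:
--                 if p - r >= 9:
--                     p -= 9
--                     ajuste_total -= 9
--                 elif p - r >= 6:
--                     p -= 6
--                     ajuste_total -= 6
--                 elif p - r >= 3:
--                     p -= 3
--                     ajuste_total -= 3
--                 else:
--                     p -= 1
--                     ajuste_total -= 1
--         ajustes.append(ajuste_total)
--     return ajustes
-- ===== SOURCE B (Python) =====
-- def calcular_ajustes_reversos(previsao, resultado_esperado):
--     return [r - p for p, r in zip(previsao, resultado_esperado)]
-- ===== Notes on version B (the rewrite author's own statement) =====
-- stated objective: faster
-- what changed: Replaces the per-pair stepwise while loop (repeatedly adding/subtracting 9/6/3/1 until p equals r) with the closed form r - p per pair, since the accumulated adjustment always equals the total gap.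
import Mathlib
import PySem

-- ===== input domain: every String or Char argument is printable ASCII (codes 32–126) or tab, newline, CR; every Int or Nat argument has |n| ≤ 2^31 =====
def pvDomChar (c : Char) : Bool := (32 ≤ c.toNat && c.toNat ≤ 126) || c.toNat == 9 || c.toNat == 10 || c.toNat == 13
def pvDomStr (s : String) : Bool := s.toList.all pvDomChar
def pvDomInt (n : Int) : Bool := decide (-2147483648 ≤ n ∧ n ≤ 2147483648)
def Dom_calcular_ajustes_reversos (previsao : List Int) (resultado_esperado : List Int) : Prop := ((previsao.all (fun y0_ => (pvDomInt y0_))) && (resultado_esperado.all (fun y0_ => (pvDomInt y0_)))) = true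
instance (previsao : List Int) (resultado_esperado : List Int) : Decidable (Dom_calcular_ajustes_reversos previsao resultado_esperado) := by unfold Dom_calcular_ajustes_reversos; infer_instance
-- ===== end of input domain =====

-- B replaces A's per-pair stepwise while loop with the closed form r - p (faster, asymptotic).
-- ===== PORT A =====
-- literal port of A's while loop: state (p, ajuste_total), same branch order
def pvLoopA (p r total : Int) : Int :=
  if p ≠ r then
    if p < r then
      if r - p ≥ 9 then pvLoopA (p + 9) r (total + 9)
      else if r - p ≥ 6 then pvLoopA (p + 6) r (total + 6)
      else if r - p ≥ 3 then pvLoopA (p + 3) r (total + 3)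
      else pvLoopA (p + 1) r (total + 1)
    else
      if p - r ≥ 9 then pvLoopA (p - 9) r (total - 9)
      else if p - r ≥ 6 then pvLoopA (p - 6) r (total - 6)
      else if p - r ≥ 3 then pvLoopA (p - 3) r (total - 3)
      else pvLoopA (p - 1) r (total - 1)
  else total
termination_by (r - p).natAbs
decreasing_by all_goals omega

def calcular_ajustes_reversos (previsao : List Int) (resultado_esperado : List Int) : List Int :=
  (List.zip previsao resultado_esperado).foldl
    (fun ajustes pr => ajustes ++ [pvLoopA pr.1 pr.2 0]) []

-- ===== PORT B =====
def calcular_ajustes_reversos_alt (previsao : List Int) (resultado_esperado : List Int) : List Int :=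
  (List.zip previsao resultado_esperado).map (fun pr => pr.2 - pr.1)

-- ===== PRECONDITION & SPEC =====
def Spec_calcular_ajustes_reversos (previsao : List Int) (resultado_esperado : List Int) (out : List Int) : Prop := out = calcular_ajustes_reversos_alt previsao resultado_esperado
instance (previsao : List Int) (resultado_esperado : List Int) (out : List Int) : Decidable (Spec_calcular_ajustes_reversos previsao resultado_esperado out) := by unfold Spec_calcular_ajustes_reversos; infer_instance

-- ===== CLAIM (what is proved, stated in full; the proofs are below) =====
def Claim_equal_calcular_ajustes_reversos : Prop := ∀ (previsao : List Int) (resultado_esperado : List Int), Dom_calcular_ajustes_reversos previsao resultado_esperado → Spec_calcular_ajustes_reversos previsao resultado_esperado (calcular_ajustes_reversos previsao resultado_esperado)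

-- ===== LEMMAS AND PROOFS =====

theorem pvLoopA_eq (p r total : Int) : pvLoopA p r total = total + (r - p) := by
  fun_induction pvLoopA p r total <;> omega

theorem pvFoldA_eq (l : List (Int × Int)) (acc : List Int) :
    l.foldl (fun ajustes pr => ajustes ++ [pvLoopA pr.1 pr.2 0]) acc
      = acc ++ l.map (fun pr => pr.2 - pr.1) := by
  induction l generalizing acc with
  | nil => simp
  | cons hd tl ih => rw [List.foldl_cons, ih]; simp [pvLoopA_eq]

-- ===== VERDICT (by name: the statement is the Claim_ definition above) =====
theorem calcular_ajustes_reversos_spec : Claim_equal_calcular_ajustes_reversos := by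
  intro previsao resultado_esperado _
  unfold Spec_calcular_ajustes_reversos calcular_ajustes_reversos calcular_ajustes_reversos_alt
  rw [pvFoldA_eq]
  simp
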